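-- pv_equiv track=rewrite | github.com/so-soon/coding_test_programmers | cookie_purchasing.py | solution
-- ===== SOURCE A (Python) =====
-- def solution(cookie):
--     answer = 0
--
--     section_sum = []
--     N = len(cookie)
--     for i in range(N):
--         if i == 0 :
--             section_sum.append(cookie[i])
--         else:
--             section_sum.append(cookie[i]+section_sum[i-1])
--
--
--     maxi = 0
--     isMaxFind = False
--
--     for f in range(0,N):
--         for l in range(1,N-f+1):
--             if f == 0:
--                 f_sun = section_sum[f+l-1]
--             else:
--                 f_sun = section_sum[f+l-1] - section_sum[f-1]
--
--             s = f+l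
--             if f_sun > section_sum[-1] - section_sum[s-1]:
--                 break
--             if f_sun < maxi:
--                 continue
--             for l2 in range(1,N-s+1):
--                 s_sun = section_sum[s+l2-1] - section_sum[s-1]
--
--                 if f_sun == s_sun:
--                     maxi = max(maxi,f_sun)
--                     if maxi == section_sum[-1]//2:
--                         isMaxFind = True
--                     break
--
--                 elif f_sun < s_sun:
--                     break
--             if isMaxFind:
--                 break
--         if isMaxFind:
--             break
--
--     answer = maxi
--
--     return answer
-- ===== SOURCE B (Python) =====
-- def solution(cookie):
--     # Same answer as the original scan, but the innermost linear search
--     # ("first second-block end whose sum reaches the first-block sum") is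
--     # answered by a segment tree over the prefix sums in O(log N).
--     N = len(cookie)
--     pre = [0] * (N + 1)
--     for i in range(N):
--         pre[i + 1] = pre[i] + cookie[i]
--     total = pre[N]
--     half = total // 2
--
--     # segment tree over pre[0..N]; leaf = (index, value), node = (hi, mx, l, r)
--     def build(off, vals):
--         n = len(vals)
--         if n == 1:
--             return (off, vals[0])
--         k = n // 2
--         left = build(off, vals[:k])
--         right = build(off + k, vals[k:])
--         return (off + n - 1, max(left[1], right[1]), left, right)
--
--     def first_ge(t, lo, x):
--         # leftmost index e >= lo with pre[e] >= x, or None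
--         if len(t) == 2:
--             i, v = t
--             return i if lo <= i and x <= v else None
--         hi, mx, left, right = t
--         if hi < lo or mx < x:
--             return None
--         r = first_ge(left, lo, x)
--         return r if r is not None else first_ge(right, lo, x)
--
--     tree = build(0, pre)
--     maxi = 0
--     for f in range(N):
--         for s in range(f + 1, N + 1):
--             fs = pre[s] - pre[f]
--             if fs > total - pre[s]:
--                 break
--             if fs < maxi:
--                 continue
--             e = first_ge(tree, s + 1, fs + pre[s])
--             if e is not None and pre[e] == fs + pre[s]:
--                 maxi = max(maxi, fs)
--                 if maxi == half:
--                     return maxi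
--     return maxi
-- ===== Notes on version B (the rewrite author's own statement) =====
-- stated objective: faster
-- what changed: A's innermost linear scan for the first adjacent second block whose running sum reaches the first-block sum is replaced by a logarithmic descent in a segment tree of prefix-sum maxima built once, eliminating the third nested loop.
import Mathlib
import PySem

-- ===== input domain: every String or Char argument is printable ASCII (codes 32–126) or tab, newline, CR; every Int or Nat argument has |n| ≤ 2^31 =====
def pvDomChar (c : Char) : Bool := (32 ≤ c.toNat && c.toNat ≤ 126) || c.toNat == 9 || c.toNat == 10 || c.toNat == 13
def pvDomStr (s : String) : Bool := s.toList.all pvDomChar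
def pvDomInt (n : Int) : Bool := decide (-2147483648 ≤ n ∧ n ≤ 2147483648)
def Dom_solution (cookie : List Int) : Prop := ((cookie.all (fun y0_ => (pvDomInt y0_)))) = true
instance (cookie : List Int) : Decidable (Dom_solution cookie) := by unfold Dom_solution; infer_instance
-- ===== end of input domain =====

-- B replaces A's innermost linear search by a segment-tree descent over the prefix sums (objective: faster).

-- ===== PORT A =====
-- first loop of A: section_sum (running prefix sums, built by appending)
def secSum (cookie : List Int) : List Int :=
  (PySem.List.pyRange 0 (cookie.length : Int) 1).foldl
    (fun acc i =>
      if i = 0 then acc ++ [PySem.List.pyGetD cookie i 0]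
      else acc ++ [PySem.List.pyGetD cookie i 0 + PySem.List.pyGetD acc (i - 1) 0]) []

-- innermost 'for l2 in range(1, N-s+1)' loop; returns (maxi, isMaxFind)
def innerA (sec : List Int) (N s : Nat) (fsun maxi : Int) (isMax : Bool) (l2 : Nat) :
    Int × Bool :=
  if _h : N - s + 1 ≤ l2 then (maxi, isMax)
  else
    let ssun := PySem.List.pyGetD sec ((s : Int) + (l2 : Int) - 1) 0 -
                PySem.List.pyGetD sec ((s : Int) - 1) 0
    if fsun = ssun then
      let m := max maxi fsun
      (m, if m = PySem.Int.floordiv (PySem.List.pyGetD sec (-1) 0) 2 then true else isMax)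
    else if fsun < ssun then (maxi, isMax)
    else innerA sec N s fsun maxi isMax (l2 + 1)
termination_by N - s + 1 - l2
decreasing_by omega

-- f_sun of A ('if f == 0: ... else: ...')
def fsunA (sec : List Int) (f l : Nat) : Int :=
  if f = 0 then PySem.List.pyGetD sec ((f : Int) + (l : Int) - 1) 0
  else PySem.List.pyGetD sec ((f : Int) + (l : Int) - 1) 0 -
       PySem.List.pyGetD sec ((f : Int) - 1) 0

-- middle 'for l in range(1, N-f+1)' loop (locals f_sun, s, and the inner result are inlined)
def midA (sec : List Int) (N f : Nat) (maxi : Int) (isMax : Bool) (l : Nat) : Int × Bool :=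
  if _h : N - f + 1 ≤ l then (maxi, isMax)
  else if fsunA sec f l >
      PySem.List.pyGetD sec (-1) 0 - PySem.List.pyGetD sec (((f + l : Nat) : Int) - 1) 0 then
    (maxi, isMax)                                   -- break
  else if fsunA sec f l < maxi then midA sec N f maxi isMax (l + 1)   -- continue
  else if (innerA sec N (f + l) (fsunA sec f l) maxi isMax 1).2 = true then
    innerA sec N (f + l) (fsunA sec f l) maxi isMax 1                 -- 'if isMaxFind: break'
  else
    midA sec N f (innerA sec N (f + l) (fsunA sec f l) maxi isMax 1).1
      (innerA sec N (f + l) (fsunA sec f l) maxi isMax 1).2 (l + 1)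
termination_by N - f + 1 - l
decreasing_by all_goals omega

-- outer 'for f in range(0, N)' loop
def outerA (sec : List Int) (N f : Nat) (maxi : Int) (isMax : Bool) : Int :=
  if _h : N ≤ f then maxi
  else if (midA sec N f maxi isMax 1).2 = true then (midA sec N f maxi isMax 1).1
  else outerA sec N (f + 1) (midA sec N f maxi isMax 1).1 (midA sec N f maxi isMax 1).2
termination_by N - f
decreasing_by omega

def solution (cookie : List Int) : Int :=
  outerA (secSum cookie) cookie.length 0 0 false

-- ===== PORT B =====
-- prefix sums pre[0..N] (pre[0] = 0), built with the running value as part of the state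
def preB (cookie : List Int) : List Int :=
  (cookie.foldl (fun (p : List Int × Int) c => (p.1 ++ [p.2 + c], p.2 + c)) ([0], 0)).1

-- segment tree over pre: leaf (index, value); node (hi = last index, mx = subtree max, l, r)
inductive STree where
  | leaf : Nat → Int → STree
  | node : Nat → Int → STree → STree → STree

def stMax (t : STree) : Int :=
  match t with
  | .leaf _ v => v
  | .node _ m _ _ => m

def build (off : Nat) (vals : List Int) : STree :=
  if _h : vals.length ≤ 1 then .leaf off (PySem.List.pyGetD vals 0 0)  -- only used on nonempty vals
  else
    let k := vals.length / 2
    let l := build off (vals.take k)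
    let r := build (off + k) (vals.drop k)
    .node (off + vals.length - 1) (max (stMax l) (stMax r)) l r
termination_by vals.length
decreasing_by
  · simp only [List.length_take]; omega
  · simp only [List.length_drop]; omega

-- leftmost index e ≥ lo with pre[e] ≥ x, or none
def firstGE (t : STree) (lo : Nat) (x : Int) : Option Nat :=
  match t with
  | .leaf i v => if lo ≤ i ∧ x ≤ v then some i else none
  | .node hi mx l r =>
      if hi < lo ∨ mx < x then none
      else match firstGE l lo x with
           | some i => some i
           | none => firstGE r lo x

-- 'for s in range(f+1, N+1)' loop; second component = 'return maxi' was hit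
-- first-block sum pre[s] - pre[f] of B
def fsB (pre : List Int) (f s : Nat) : Int :=
  PySem.List.pyGetD pre (s : Int) 0 - PySem.List.pyGetD pre (f : Int) 0

def loopSB (pre : List Int) (t : STree) (N : Nat) (total half : Int) (f : Nat) (maxi : Int)
    (s : Nat) : Int × Bool :=
  if _h : N + 1 ≤ s then (maxi, false)
  else if fsB pre f s > total - PySem.List.pyGetD pre (s : Int) 0 then (maxi, false)  -- break
  else if fsB pre f s < maxi then loopSB pre t N total half f maxi (s + 1)            -- continue
  else
    match firstGE t (s + 1) (fsB pre f s + PySem.List.pyGetD pre (s : Int) 0) with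
    | some e =>
        if PySem.List.pyGetD pre (e : Int) 0 = fsB pre f s + PySem.List.pyGetD pre (s : Int) 0 then
          if max maxi (fsB pre f s) = half then (max maxi (fsB pre f s), true)
          else loopSB pre t N total half f (max maxi (fsB pre f s)) (s + 1)
        else loopSB pre t N total half f maxi (s + 1)
    | none => loopSB pre t N total half f maxi (s + 1)
termination_by N + 1 - s
decreasing_by all_goals omega

-- 'for f in range(N)' loop
def loopFB (pre : List Int) (t : STree) (N : Nat) (total half : Int) (f : Nat) (maxi : Int) :
    Int :=
  if _h : N ≤ f then maxi
  else if (loopSB pre t N total half f maxi (f + 1)).2 = true then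
    (loopSB pre t N total half f maxi (f + 1)).1
  else loopFB pre t N total half (f + 1) (loopSB pre t N total half f maxi (f + 1)).1
termination_by N - f
decreasing_by omega

def solution_alt (cookie : List Int) : Int :=
  let N := cookie.length
  let pre := preB cookie
  let total := PySem.List.pyGetD pre (N : Int) 0
  let half := PySem.Int.floordiv total 2
  loopFB pre (build 0 pre) N total half 0 0

-- ===== PRECONDITION & SPEC =====
def Spec_solution (cookie : List Int) (out : Int) : Prop := out = solution_alt cookie
instance (cookie : List Int) (out : Int) : Decidable (Spec_solution cookie out) := by unfold Spec_solution; infer_instance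

-- ===== CLAIM (what is proved, stated in full; the proofs are below) =====
def Claim_equal_solution : Prop := ∀ (cookie : List Int), Dom_solution cookie → Spec_solution cookie (solution cookie)

-- ===== LEMMAS AND PROOFS =====

-- specification prefix-sum list: pres xs a = [a + x0, a + x0 + x1, ...]
def pres : List Int → Int → List Int
  | [], _ => []
  | c :: cs, a => (a + c) :: pres cs (a + c)

-- linear reference scan for firstGE: first index i ≥ lo among off, off+1, ... with x ≤ vals[i-off]
def scanFirst : Nat → List Int → Nat → Int → Option Nat
  | _, [], _, _ => none
  | off, v :: vs, lo, x =>
      if lo ≤ off ∧ x ≤ v then some off else scanFirst (off + 1) vs lo x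

-- index-based reference scan over pre
def firstIdx (P : List Int) (N e : Nat) (x : Int) : Option Nat :=
  if _h : N + 1 ≤ e then none
  else if x ≤ P.getD e 0 then some e else firstIdx P N (e + 1) x
termination_by N + 1 - e
decreasing_by omega

theorem pres_length (xs : List Int) (a : Int) : (pres xs a).length = xs.length := by
  induction xs generalizing a with
  | nil => rfl
  | cons c cs ih => simp [pres, ih]

theorem pres_append_singleton (xs : List Int) (x a : Int) :
    pres (xs ++ [x]) a = pres xs a ++ [a + xs.sum + x] := by
  induction xs generalizing a with
  | nil => simp [pres]
  | cons c cs ih => simp [pres, ih, add_assoc]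
theorem pres_getD_last (xs : List Int) (a : Int) (h : xs ≠ []) :
    (pres xs a).getD (xs.length - 1) 0 = a + xs.sum := by
  induction xs generalizing a with
  | nil => simp at h
  | cons c cs ih =>
    cases hcs : cs with
    | nil => simp [pres]
    | cons d ds =>
      subst hcs
      have := ih (a := a + c) (by simp)
      simp only [pres, List.length_cons, Nat.add_sub_cancel] at this ⊢
      simpa [add_assoc] using this
theorem preB_fold (xs : List Int) (ys : List Int) (a : Int) :
    xs.foldl (fun (p : List Int × Int) c => (p.1 ++ [p.2 + c], p.2 + c)) (ys, a) =
      (ys ++ pres xs a, a + xs.sum) := by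
  induction xs generalizing ys a with
  | nil => simp [pres]
  | cons c cs ih => simp [List.foldl_cons, ih, pres, add_assoc]

theorem preB_eq (cookie : List Int) : preB cookie = 0 :: pres cookie 0 := by
  simp [preB, preB_fold]
theorem sec_inv (cookie : List Int) (n : Nat) (hn : n ≤ cookie.length) :
    (PySem.List.pyRange 0 (n : Int) 1).foldl
      (fun acc i =>
        if i = 0 then acc ++ [PySem.List.pyGetD cookie i 0]
        else acc ++ [PySem.List.pyGetD cookie i 0 + PySem.List.pyGetD acc (i - 1) 0]) [] =
      pres (cookie.take n) 0 := by
  induction n with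
  | zero => simp [PySem.List.pyRange, pres]
  | succ m ih =>
    have hm : m ≤ cookie.length := by omega
    have hcast : ((m + 1 : Nat) : Int) = (m : Int) + 1 := by push_cast; ring
    rw [hcast, PySem.List.pyRange_one_succ_right (by positivity), List.foldl_append, ih hm]
    have htake : cookie.take (m + 1) = cookie.take m ++ [cookie.getD m 0] := by
      rw [List.getD_eq_getElem _ _ (by omega), List.take_add_one, List.getElem?_eq_getElem (by omega)]
      rfl
    rw [htake, pres_append_singleton]
    by_cases hm0 : m = 0
    · subst hm0
      simp [pres, PySem.List.pyGetD_zero]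
    · have hm1 : 1 ≤ m := Nat.one_le_iff_ne_zero.mpr hm0
      have : ((m : Int) ≠ 0) := by exact_mod_cast hm0
      simp only [List.foldl_cons, List.foldl_nil, if_neg this]
      have h1 : (m : Int) - 1 = ((m - 1 : Nat) : Int) := by omega
      rw [h1, PySem.List.pyGetD_natCast, PySem.List.pyGetD_natCast]
      have hne : cookie.take m ≠ [] :=
        List.ne_nil_of_length_pos (by rw [List.length_take]; omega)
      have hlp := pres_getD_last (cookie.take m) 0 hne
      rw [List.length_take] at hlp
      have hmin : min m cookie.length = m := by omega
      rw [hmin] at hlp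
      rw [hlp]
      ring_nf

theorem secSum_eq (cookie : List Int) : secSum cookie = pres cookie 0 := by
  have := sec_inv cookie cookie.length le_rfl
  simpa [secSum] using this
-- every value in the tree is ≤ its cached max
theorem stMax_ub (off : Nat) (vals : List Int) (v : Int) (hv : v ∈ vals) :
    v ≤ stMax (build off vals) := by
  induction hn : vals.length using Nat.strong_induction_on generalizing off vals v with
  | _ n ih =>
  subst hn
  rw [build]
  split
  · -- length ≤ 1: vals = [v]
    rename_i h1
    match vals, hv, h1 with
    | [w], hv, _ =>
      simp at hv
      simp [stMax, hv, PySem.List.pyGetD_zero]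
  · rename_i h1
    simp only [stMax]
    have hv' : v ∈ vals.take (vals.length / 2) ++ vals.drop (vals.length / 2) := by
      rw [List.take_append_drop]; exact hv
    rcases List.mem_append.mp hv' with h | h
    · exact le_max_of_le_left (ih (vals.take (vals.length / 2)).length
        (by rw [List.length_take]; omega) off _ v h rfl)
    · exact le_max_of_le_right (ih (vals.drop (vals.length / 2)).length
        (by rw [List.length_drop]; omega) (off + vals.length / 2) _ v h rfl)
theorem scanFirst_none_of_lt (off : Nat) (vals : List Int) (lo : Nat) (x : Int)
    (h : ∀ v ∈ vals, v < x) : scanFirst off vals lo x = none := by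
  induction vals generalizing off with
  | nil => rfl
  | cons v vs ih =>
    have := h v (by simp)
    simp only [scanFirst]
    rw [if_neg (by push Not; intro _; omega)]
    exact ih (off + 1) (fun w hw => h w (by simp [hw]))
theorem scanFirst_none_of_hi (off : Nat) (vals : List Int) (lo : Nat) (x : Int)
    (h : off + vals.length ≤ lo) : scanFirst off vals lo x = none := by
  induction vals generalizing off with
  | nil => rfl
  | cons v vs ih =>
    simp only [scanFirst]
    rw [if_neg (by push Not; intro h2; simp at h; omega)]
    exact ih (off + 1) (by simp at h ⊢; omega)
theorem scanFirst_append (off : Nat) (as bs : List Int) (lo : Nat) (x : Int) :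
    scanFirst off (as ++ bs) lo x =
      (match scanFirst off as lo x with
       | some i => some i
       | none => scanFirst (off + as.length) bs lo x) := by
  induction as generalizing off with
  | nil => simp [scanFirst]
  | cons a as ih =>
    simp only [List.cons_append, scanFirst]
    split
    · rfl
    · rw [ih (off + 1)]
      simp only [List.length_cons]
      have : off + 1 + as.length = off + (as.length + 1) := by omega
      rw [this]
-- the segment-tree descent computes the linear scan
theorem build_firstGE (vals : List Int) (off lo : Nat) (x : Int) (h : vals ≠ []) :
    firstGE (build off vals) lo x = scanFirst off vals lo x := by
  induction hn : vals.length using Nat.strong_induction_on generalizing off vals with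
  | _ n ih =>
  subst hn
  rw [build]
  split
  · rename_i h1
    match vals, h, h1 with
    | [v], _, _ => simp [firstGE, scanFirst, PySem.List.pyGetD_zero]
  · rename_i h1
    push Not at h1
    simp only [firstGE]
    set k := vals.length / 2 with hk
    have hkl : 1 ≤ k ∧ k < vals.length := by constructor <;> omega
    have htl : (vals.take k).length = k := by rw [List.length_take]; omega
    have hdl : (vals.drop k).length = vals.length - k := by rw [List.length_drop]
    split
    · rename_i hcond
      rcases hcond with hhi | hmx
      · -- all indices < lo
        rw [scanFirst_none_of_hi _ _ _ _ (by omega)]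
      · -- all values < x
        rw [scanFirst_none_of_lt _ _ _ _ ?_]
        intro v hv
        have hv' : v ∈ vals.take k ++ vals.drop k := by
          rw [List.take_append_drop]; exact hv
        rcases List.mem_append.mp hv' with h' | h'
        · have := stMax_ub off (vals.take k) v h'
          simp only [stMax] at *
          omega
        · have := stMax_ub (off + k) (vals.drop k) v h'
          simp only [stMax] at *
          omega
    · rename_i hcond
      have e1 := ih (vals.take k).length (by rw [htl]; omega) (vals.take k) off
        (List.ne_nil_of_length_pos (by omega)) rfl
      have e2 := ih (vals.drop k).length (by rw [hdl]; omega) (vals.drop k) (off + k)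
        (List.ne_nil_of_length_pos (by omega)) rfl
      rw [e1, e2]
      conv_rhs => rw [← List.take_append_drop k vals, scanFirst_append]
      rw [htl]
theorem firstIdx_of_big (P : List Int) (N e : Nat) (x : Int) (h : N + 1 ≤ e) :
    firstIdx P N e x = none := by
  rw [firstIdx]; simp [h]

theorem scanFirst_eq_firstIdx (P : List Int) (N : Nat) (vals : List Int) (off lo : Nat)
    (x : Int) (hv : vals = P.drop off) (hl : off + vals.length = N + 1) :
    scanFirst off vals lo x = firstIdx P N (max lo off) x := by
  induction vals generalizing off with
  | nil =>
    simp only [List.length_nil, Nat.add_zero] at hl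
    rw [scanFirst, firstIdx_of_big]
    omega
  | cons v vs ih =>
    have hoff : off ≤ N := by simp at hl; omega
    have hgd : P.getD off 0 = v := by
      have h0 : P[off]? = some v := by
        have : (P.drop off)[0]? = P[off + 0]? := List.getElem?_drop
        rw [← hv] at this
        simpa using this.symm
      simp [List.getD, h0]
    have hvs : vs = P.drop (off + 1) := by
      have := congrArg (List.drop 1) hv
      simpa [List.drop_drop, Nat.add_comm] using this
    have hl' : off + 1 + vs.length = N + 1 := by simp at hl; omega
    by_cases hlo : lo ≤ off
    · have hmax : max lo off = off := by omega
      rw [hmax, firstIdx, dif_neg (by omega)]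
      simp only [scanFirst, hgd]
      by_cases hx : x ≤ v
      · rw [if_pos ⟨hlo, hx⟩, if_pos hx]
      · rw [if_neg (by tauto), if_neg hx, ih (off + 1) hvs hl']
        congr 1
        omega
    · have hmax : max lo off = lo := by omega
      rw [scanFirst, if_neg (by tauto), ih (off + 1) hvs hl']
      congr 1
      omega

-- A's inner loop = 'find first e with pre[e] ≥ target, succeed on equality'
theorem getD_shift (P sec : List Int) (k : Nat) (hP : P = 0 :: sec) :
    sec.getD k 0 = P.getD (k + 1) 0 := by
  subst hP; rfl

theorem sec_neg_one (P sec : List Int) (N : Nat) (hP : P = 0 :: sec) (hlen : sec.length = N)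
    (hN : 1 ≤ N) : PySem.List.pyGetD sec (-1) 0 = P.getD N 0 := by
  have hne : sec ≠ [] := List.ne_nil_of_length_pos (by omega)
  rw [PySem.List.pyGetD_neg_one sec 0 hne, List.getLast_eq_getElem]
  rw [← List.getD_eq_getElem sec 0 (by omega), hlen,
    getD_shift P sec (N - 1) hP]
  congr 1
  omega

theorem innerA_eq (P sec : List Int) (N s l2 : Nat) (fsun maxi : Int) (isMax : Bool)
    (hP : P = 0 :: sec) (hlen : sec.length = N) (hs1 : 1 ≤ s) (hsN : s ≤ N) (hl2 : 1 ≤ l2) :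
    innerA sec N s fsun maxi isMax l2 =
      (firstIdx P N (s + l2) (fsun + P.getD s 0)).elim (maxi, isMax) (fun e =>
           if P.getD e 0 = fsun + P.getD s 0 then
             (max maxi fsun,
              if max maxi fsun = PySem.Int.floordiv (P.getD N 0) 2 then true else isMax)
           else (maxi, isMax)) := by
  induction hn : N + 1 - (s + l2) using Nat.strong_induction_on generalizing l2 with
  | _ n ih =>
  subst hn
  rw [innerA]
  by_cases hg : N - s + 1 ≤ l2
  · rw [dif_pos hg, firstIdx_of_big _ _ _ _ (by omega), Option.elim_none]
  · rw [dif_neg hg]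
    have hc1 : (s : Int) + (l2 : Int) - 1 = ((s + l2 - 1 : Nat) : Int) := by omega
    have hc2 : (s : Int) - 1 = ((s - 1 : Nat) : Int) := by omega
    rw [hc1, hc2, PySem.List.pyGetD_natCast, PySem.List.pyGetD_natCast,
      getD_shift P sec (s + l2 - 1) hP, getD_shift P sec (s - 1) hP,
      sec_neg_one P sec N hP hlen (by omega)]
    have he1 : s + l2 - 1 + 1 = s + l2 := by omega
    have he2 : s - 1 + 1 = s := by omega
    rw [he1, he2, firstIdx, dif_neg (by omega)]
    by_cases h1 : fsun = P.getD (s + l2) 0 - P.getD s 0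
    · have hx : fsun + P.getD s 0 ≤ P.getD (s + l2) 0 := by omega
      have hpe : P.getD (s + l2) 0 = fsun + P.getD s 0 := by omega
      rw [if_pos h1, if_pos hx, Option.elim_some, if_pos hpe]
    · rw [if_neg h1]
      by_cases h2 : fsun < P.getD (s + l2) 0 - P.getD s 0
      · have hx : fsun + P.getD s 0 ≤ P.getD (s + l2) 0 := by omega
        have hpe : ¬ P.getD (s + l2) 0 = fsun + P.getD s 0 := by omega
        rw [if_pos h2, if_pos hx, Option.elim_some, if_neg hpe]
      · have hx : ¬ fsun + P.getD s 0 ≤ P.getD (s + l2) 0 := by omega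
        rw [if_neg h2, if_neg hx, ih (N + 1 - (s + (l2 + 1))) (by omega) (l2 + 1)
          (by omega) rfl, Nat.add_assoc]

theorem mid_eq (P sec : List Int) (N f l : Nat) (maxi : Int)
    (hP : P = 0 :: sec) (hlen : sec.length = N) (hf : f < N) (hl : 1 ≤ l) :
    loopSB P (build 0 P) N (P.getD N 0) (PySem.Int.floordiv (P.getD N 0) 2) f maxi (f + l) =
      midA sec N f maxi false l := by
  induction hn : N + 1 - (f + l) using Nat.strong_induction_on generalizing l maxi with
  | _ n ih =>
  subst hn
  rw [loopSB, midA]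
  by_cases hg : N - f + 1 ≤ l
  · rw [dif_pos (by omega), dif_pos hg]
  · rw [dif_neg (by omega), dif_neg hg]
    have hsN : f + l ≤ N := by omega
    have IH : ∀ M : Int, loopSB P (build 0 P) N (P.getD N 0)
        (PySem.Int.floordiv (P.getD N 0) 2) f M (f + l + 1) = midA sec N f M false (l + 1) := by
      intro M
      rw [show f + l + 1 = f + (l + 1) by omega]
      exact ih (N + 1 - (f + (l + 1))) (by omega) (l + 1) M (by omega) rfl
    have hPne : P ≠ [] := by rw [hP]; exact List.cons_ne_nil _ _
    have hPl : (0 : Nat) + P.length = N + 1 := by rw [hP]; simp [hlen]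
    -- the first-block sum is the same on both sides
    have hfs : fsunA sec f l = fsB P f (f + l) := by
      rw [fsunA, fsB]
      have hc1 : (f : Int) + (l : Int) - 1 = ((f + l - 1 : Nat) : Int) := by omega
      rw [hc1, PySem.List.pyGetD_natCast, PySem.List.pyGetD_natCast, PySem.List.pyGetD_natCast,
        getD_shift P sec (f + l - 1) hP, show f + l - 1 + 1 = f + l by omega]
      by_cases hf0 : f = 0
      · subst hf0
        rw [if_pos rfl, hP]
        simp
      · rw [if_neg hf0]
        have hc2 : (f : Int) - 1 = ((f - 1 : Nat) : Int) := by omega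
        rw [hc2, PySem.List.pyGetD_natCast, getD_shift P sec (f - 1) hP,
          show f - 1 + 1 = f by omega]
    -- the break condition is the same on both sides
    have hbrk : PySem.List.pyGetD sec (-1) 0 -
        PySem.List.pyGetD sec (((f + l : Nat) : Int) - 1) 0 =
        P.getD N 0 - PySem.List.pyGetD P ((f + l : Nat) : Int) 0 := by
      rw [sec_neg_one P sec N hP hlen (by omega),
        show ((f + l : Nat) : Int) - 1 = ((f + l - 1 : Nat) : Int) by omega,
        PySem.List.pyGetD_natCast, getD_shift P sec (f + l - 1) hP,
        show f + l - 1 + 1 = f + l by omega, PySem.List.pyGetD_natCast]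
    rw [hfs, hbrk]
    by_cases hb : fsB P f (f + l) > P.getD N 0 - PySem.List.pyGetD P ((f + l : Nat) : Int) 0
    · rw [if_pos hb, if_pos hb]
    · rw [if_neg hb, if_neg hb]
      by_cases hlt : fsB P f (f + l) < maxi
      · rw [if_pos hlt, if_pos hlt, IH maxi]
      · rw [if_neg hlt, if_neg hlt]
        have hnat : PySem.List.pyGetD P ((f + l : Nat) : Int) 0 = P.getD (f + l) 0 :=
          PySem.List.pyGetD_natCast P (f + l) 0
        rw [innerA_eq P sec N (f + l) 1 (fsB P f (f + l)) maxi false hP hlen (by omega) hsN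
            le_rfl,
          build_firstGE P 0 (f + l + 1) (fsB P f (f + l) + PySem.List.pyGetD P ((f + l : Nat) : Int) 0) hPne,
          scanFirst_eq_firstIdx P N P 0 (f + l + 1) _ List.drop_zero.symm hPl, Nat.max_zero,
          hnat]
        rcases hE : firstIdx P N (f + l + 1) (fsB P f (f + l) + P.getD (f + l) 0) with _ | e
        · simp only [Option.elim_none, Bool.false_eq_true, if_false]
          exact IH maxi
        · simp only [Option.elim_some]
          by_cases heq : P.getD e 0 = fsB P f (f + l) + P.getD (f + l) 0
          · have heq' : PySem.List.pyGetD P ((e : Nat) : Int) 0 =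
                fsB P f (f + l) + P.getD (f + l) 0 := by
              rw [PySem.List.pyGetD_natCast]; exact heq
            rw [if_pos heq', if_pos heq]
            by_cases hhalf : max maxi (fsB P f (f + l)) = PySem.Int.floordiv (P.getD N 0) 2
            · rw [if_pos hhalf]
              simp [hhalf]
            · rw [if_neg hhalf]
              simp only [if_neg hhalf, Bool.false_eq_true, if_false]
              exact IH (max maxi (fsB P f (f + l)))
          · have heq' : ¬ PySem.List.pyGetD P ((e : Nat) : Int) 0 =
                fsB P f (f + l) + P.getD (f + l) 0 := by
              rw [PySem.List.pyGetD_natCast]; exact heq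
            rw [if_neg heq', if_neg heq]
            simp only [Bool.false_eq_true, if_false]
            exact IH maxi

theorem outer_eq (P sec : List Int) (N f : Nat) (maxi : Int)
    (hP : P = 0 :: sec) (hlen : sec.length = N) :
    loopFB P (build 0 P) N (P.getD N 0) (PySem.Int.floordiv (P.getD N 0) 2) f maxi =
      outerA sec N f maxi false := by
  induction hn : N - f using Nat.strong_induction_on generalizing f maxi with
  | _ n ih =>
  subst hn
  rw [loopFB, outerA]
  by_cases hg : N ≤ f
  · rw [dif_pos hg, dif_pos hg]
  · rw [dif_neg hg, dif_neg hg, mid_eq P sec N f 1 maxi hP hlen (by omega) le_rfl]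
    by_cases hc : (midA sec N f maxi false 1).2 = true
    · rw [if_pos hc, if_pos hc]
    · rw [if_neg hc, if_neg hc, (Bool.not_eq_true _).mp hc,
        ih (N - (f + 1)) (by omega) (f + 1) _ rfl]

-- ===== VERDICT (by name: the statement is the Claim_ definition above) =====
theorem solution_spec : Claim_equal_solution := by
  intro cookie _
  unfold Spec_solution solution solution_alt
  simp only []
  rw [secSum_eq, preB_eq]
  have hlen : (pres cookie 0).length = cookie.length := pres_length cookie 0
  rw [show PySem.List.pyGetD (0 :: pres cookie 0) ((cookie.length : Nat) : Int) 0 =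
      (0 :: pres cookie 0).getD cookie.length 0 from
      PySem.List.pyGetD_natCast _ cookie.length 0]
  exact (outer_eq (0 :: pres cookie 0) (pres cookie 0) cookie.length 0 0 rfl hlen).symm
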